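-- pv_equiv track=rewrite | github.com/akshay-greenlang/Code-V1_GreenLang | greenlang/agents/eudr/due_diligence_orchestrator/information_gathering_coordinator.py | _evaluate_article_9_coverage
-- ===== SOURCE A (Python) =====
-- from typing import Any, Dict, List, Optional, Set, Tuple
--
-- _ARTICLE_9_ELEMENTS: Dict[str, List[str]] = {
--     "product_description": ["EUDR-001"],
--     "quantity": ["EUDR-001", "EUDR-011"],
--     "country_of_production": ["EUDR-001", "EUDR-002"],
--     "geolocation": ["EUDR-002", "EUDR-006", "EUDR-007"],
--     "production_date_range": ["EUDR-001", "EUDR-003"],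
--     "supplier_identification": ["EUDR-001", "EUDR-008"],
--     "deforestation_free_proof": ["EUDR-003", "EUDR-004", "EUDR-005"],
--     "chain_of_custody": ["EUDR-009", "EUDR-010", "EUDR-011"],
--     "documentary_evidence": ["EUDR-012", "EUDR-013"],
--     "traceability_codes": ["EUDR-014", "EUDR-015"],
-- }
--
-- def _evaluate_article_9_coverage(
--
--     completed_agents: Set[str],
-- ) -> Dict[str, bool]:
--     """Evaluate which Article 9 elements are covered.
--
--     An element is covered if at least one of its source agents
--     has completed successfully.
--
--     Args:
--         completed_agents: Set of completed agent IDs.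
--
--     Returns:
--         Dictionary mapping element name to coverage status.
--     """
--     coverage: Dict[str, bool] = {}
--     for element, source_agents in _ARTICLE_9_ELEMENTS.items():
--         coverage[element] = any(
--             agent_id in completed_agents
--             for agent_id in source_agents
--         )
--     return coverage
-- ===== SOURCE B (Python) =====
-- from typing import Dict, List, Set, Tuple
--
-- # The same regulation table, in a flat (agent, element) pair representation
-- # (grouped by element in the original table's order).
-- _COVERAGE_PAIRS: List[Tuple[str, str]] = [
--     ("EUDR-001", "product_description"),
--     ("EUDR-001", "quantity"), ("EUDR-011", "quantity"),
--     ("EUDR-001", "country_of_production"), ("EUDR-002", "country_of_production"),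
--     ("EUDR-002", "geolocation"), ("EUDR-006", "geolocation"), ("EUDR-007", "geolocation"),
--     ("EUDR-001", "production_date_range"), ("EUDR-003", "production_date_range"),
--     ("EUDR-001", "supplier_identification"), ("EUDR-008", "supplier_identification"),
--     ("EUDR-003", "deforestation_free_proof"), ("EUDR-004", "deforestation_free_proof"),
--     ("EUDR-005", "deforestation_free_proof"),
--     ("EUDR-009", "chain_of_custody"), ("EUDR-010", "chain_of_custody"),
--     ("EUDR-011", "chain_of_custody"),
--     ("EUDR-012", "documentary_evidence"), ("EUDR-013", "documentary_evidence"),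
--     ("EUDR-014", "traceability_codes"), ("EUDR-015", "traceability_codes"),
-- ]
--
-- _ELEMENT_ORDER: List[str] = [
--     "product_description", "quantity", "country_of_production", "geolocation",
--     "production_date_range", "supplier_identification", "deforestation_free_proof",
--     "chain_of_custody", "documentary_evidence", "traceability_codes",
-- ]
--
-- def _evaluate_article_9_coverage(completed_agents: Set[str]) -> Dict[str, bool]:
--     covered = {element for agent, element in _COVERAGE_PAIRS
--                if agent in completed_agents}
--     return {element: element in covered for element in _ELEMENT_ORDER}
-- ===== Notes on version B (the rewrite author's own statement) =====
-- stated objective: alternative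
-- what changed: Restates the element table as a flat list of (agent, element) pairs, computes the set of covered elements with one filtered pass over the pairs, then builds the result by mapping the fixed element order over a membership test in that set, instead of A's per-element any-scan building a dict incrementally.
import Mathlib
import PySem

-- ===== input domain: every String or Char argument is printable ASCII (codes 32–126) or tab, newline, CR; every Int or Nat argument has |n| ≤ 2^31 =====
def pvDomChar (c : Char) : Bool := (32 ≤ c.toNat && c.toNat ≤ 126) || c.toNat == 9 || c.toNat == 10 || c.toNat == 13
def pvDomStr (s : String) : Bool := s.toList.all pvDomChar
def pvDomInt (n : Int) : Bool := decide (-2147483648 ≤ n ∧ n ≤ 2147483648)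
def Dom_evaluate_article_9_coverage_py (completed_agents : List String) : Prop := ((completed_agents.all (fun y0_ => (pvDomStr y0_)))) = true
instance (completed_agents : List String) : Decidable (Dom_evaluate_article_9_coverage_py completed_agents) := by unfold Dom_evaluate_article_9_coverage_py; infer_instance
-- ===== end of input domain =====

-- B restates the table as flat (agent, element) pairs, computes the set of covered
-- elements in one filtered pass, then maps the element order over it; same result, proved equal.

-- ===== PORT A =====
def art9Elements : List (String × List String) :=
  [("product_description", ["EUDR-001"]),
   ("quantity", ["EUDR-001", "EUDR-011"]),
   ("country_of_production", ["EUDR-001", "EUDR-002"]),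
   ("geolocation", ["EUDR-002", "EUDR-006", "EUDR-007"]),
   ("production_date_range", ["EUDR-001", "EUDR-003"]),
   ("supplier_identification", ["EUDR-001", "EUDR-008"]),
   ("deforestation_free_proof", ["EUDR-003", "EUDR-004", "EUDR-005"]),
   ("chain_of_custody", ["EUDR-009", "EUDR-010", "EUDR-011"]),
   ("documentary_evidence", ["EUDR-012", "EUDR-013"]),
   ("traceability_codes", ["EUDR-014", "EUDR-015"])]

def evaluate_article_9_coverage_py (completed_agents : List String) : List (String × Bool) :=
  (art9Elements.foldl
    (fun (coverage : PySem.Dict String Bool) p =>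
      coverage.insert p.1 (p.2.any (fun agent_id => completed_agents.contains agent_id)))
    PySem.Dict.empty).items

-- ===== PORT B =====
def coveragePairs : List (String × String) :=
  [("EUDR-001", "product_description"),
   ("EUDR-001", "quantity"), ("EUDR-011", "quantity"),
   ("EUDR-001", "country_of_production"), ("EUDR-002", "country_of_production"),
   ("EUDR-002", "geolocation"), ("EUDR-006", "geolocation"), ("EUDR-007", "geolocation"),
   ("EUDR-001", "production_date_range"), ("EUDR-003", "production_date_range"),
   ("EUDR-001", "supplier_identification"), ("EUDR-008", "supplier_identification"),
   ("EUDR-003", "deforestation_free_proof"), ("EUDR-004", "deforestation_free_proof"),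
   ("EUDR-005", "deforestation_free_proof"),
   ("EUDR-009", "chain_of_custody"), ("EUDR-010", "chain_of_custody"),
   ("EUDR-011", "chain_of_custody"),
   ("EUDR-012", "documentary_evidence"), ("EUDR-013", "documentary_evidence"),
   ("EUDR-014", "traceability_codes"), ("EUDR-015", "traceability_codes")]

def elementOrder : List String :=
  ["product_description", "quantity", "country_of_production", "geolocation",
   "production_date_range", "supplier_identification", "deforestation_free_proof",
   "chain_of_custody", "documentary_evidence", "traceability_codes"]

def evaluate_article_9_coverage_py_alt (completed_agents : List String) : List (String × Bool) :=
  let covered : PySem.Set String :=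
    PySem.Set.ofList
      ((coveragePairs.filter (fun q => completed_agents.contains q.1)).map Prod.snd)
  elementOrder.map (fun element => (element, PySem.Set.contains covered element))

-- ===== PRECONDITION & SPEC =====
def Spec_evaluate_article_9_coverage_py (completed_agents : List String) (out : List (String × Bool)) : Prop := out = evaluate_article_9_coverage_py_alt completed_agents
instance (completed_agents : List String) (out : List (String × Bool)) : Decidable (Spec_evaluate_article_9_coverage_py completed_agents out) := by unfold Spec_evaluate_article_9_coverage_py; infer_instance

-- ===== CLAIM (what is proved, stated in full; the proofs are below) =====
def Claim_equal_evaluate_article_9_coverage_py : Prop := ∀ (completed_agents : List String), Dom_evaluate_article_9_coverage_py completed_agents → Spec_evaluate_article_9_coverage_py completed_agents (evaluate_article_9_coverage_py completed_agents)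

-- ===== LEMMAS AND PROOFS =====

-- membership in the snd-projection of a filtered pair list, as an any-scan
lemma contains_map_filter_snd (l : List (String × String)) (f : String × String → Bool) (e : String) :
    (((l.filter f).map Prod.snd).contains e) = l.any (fun q => f q && (q.2 == e)) := by
  apply Bool.eq_iff_iff.mpr
  simp only [List.contains_iff_mem, List.mem_map, List.mem_filter, List.any_eq_true,
    Bool.and_eq_true, beq_iff_eq]
  constructor
  · rintro ⟨q, ⟨hq, hf⟩, rfl⟩; exact ⟨q, hq, hf, rfl⟩
  · rintro ⟨q, hq, hf, he⟩; exact ⟨q, ⟨hq, hf⟩, he⟩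

-- Set.ofList keeps membership
lemma set_contains_ofList (xs : List String) (e : String) :
    PySem.Set.contains (PySem.Set.ofList xs) e = xs.contains e := by
  by_cases h : e ∈ xs
  · simp [PySem.Set.contains_eq_listContains, h, PySem.Set.mem_ofList]
  · simp [PySem.Set.contains_eq_listContains, h, PySem.Set.mem_ofList]

-- ===== VERDICT (by name: the statement is the Claim_ definition above) =====
set_option maxHeartbeats 1000000 in
theorem evaluate_article_9_coverage_py_spec : Claim_equal_evaluate_article_9_coverage_py := by
  intro completed_agents _
  show _ = evaluate_article_9_coverage_py_alt completed_agents
  unfold evaluate_article_9_coverage_py evaluate_article_9_coverage_py_alt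
  simp only [set_contains_ofList, contains_map_filter_snd]
  simp [art9Elements, elementOrder, coveragePairs, PySem.Dict.empty, PySem.Dict.insert,
        List.any_cons]
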